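-- pv_equiv track=rewrite | github.com/remi-or/QAO | QAO/iterator.py | get_number_of_batches
-- ===== SOURCE A (Python) =====
-- from typing import List, Dict, Optional, Tuple
-- from itertools import product
--
-- Tokens = List[int]
--
-- QaKey = Tuple[int, int]
--
-- QaoKey = Tuple[QaKey, str]
--
-- def key_qao_iterator_auxiliary(
--     tokenized_qa_couples : Dict[QaKey, Tokens],
--     tokenized_objectives : Dict[str, Tokens],
--     qakey_to_day : Optional[Dict[QaKey, str]],
-- ) -> QaoKey:
--     if qakey_to_day is None:
--         for tokenized_couple in product(tokenized_qa_couples.keys(), tokenized_objectives.keys()):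
--             yield tokenized_couple
--     else:
--         for qakey, tokenized_qa in tokenized_qa_couples.items():
--             day = qakey_to_day[qakey]
--             for obj_id, tokenized_obj in tokenized_objectives.items():
--                 if obj_id.startswith(day):
--                     yield tokenized_qa, tokenized_obj
--
-- def key_qao_iterator(
--     tokenized_qa_couples : Dict[QaKey, Tokens],
--     tokenized_objectives : Dict[str, Tokens],
--     qakey_to_day : Optional[Dict[QaKey, str]] = None,
--     keys_to_skip : int = 0,
-- ) -> QaoKey:
--     """
--     Given a dictionnary of (tokenized_qa_couples) like the one returned by QAO.tokenization's [tokenize_qa_couples]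
--       and a dictionnary of (tokenized_objectives) like the one returned by QAO.tokenazition's [tokenized_objectives],
--     returns every QaoKey corresponding to a qa_couple / objective pair.
--     The iterator can skip a given number of (keys_to_skip).
--     """
--     iterator = key_qao_iterator_auxiliary(tokenized_qa_couples, tokenized_objectives, qakey_to_day)
--     for i in range(keys_to_skip):
--         _ = next(iterator)
--     return iterator
--
-- def get_number_of_batches(
--     tokenized_qa_couples : Dict[QaKey, Tokens],
--     tokenized_objectives : Dict[str, Tokens],
--     batch_size : int = 16,
--     keys_to_skip : int = 0,
-- ) -> int:
--     """
--     Given a dictionnary of (tokenized_qa_couples) like the one returned by QAO.tokenization's [tokenize_qa_couples]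
--       and a dictionnary of (tokenized_objectives) like the one returned by QAO.tokenazition's [tokenized_objectives],
--       and a (batch_size) like the one used in [tokenized_qao_iterator],
--     returns the number of batches [tokenized_qao_iterator] will yield as an int.
--     Also takes into account the eventual number of (keys_to_skip).
--     """
--     total_size = 0
--     for _ in key_qao_iterator(tokenized_qa_couples, tokenized_objectives, keys_to_skip=keys_to_skip):
--         total_size += 1
--     return (total_size // batch_size) + int(total_size % batch_size != 0)
-- ===== SOURCE B (Python) =====
-- def get_number_of_batches(tokenized_qa_couples, tokenized_objectives, batch_size=16, keys_to_skip=0):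
--     remaining = len(tokenized_qa_couples) * len(tokenized_objectives) - max(keys_to_skip, 0)
--     return -(-remaining // batch_size)
-- ===== Notes on version B (the rewrite author's own statement) =====
-- stated objective: faster
-- what changed: B replaces A's materialised iteration over the full qa-key x objective-key product (counting one by one after skipping) with a closed-form count len(qa)*len(obj)-max(keys_to_skip,0) followed by a ceiling division -(-r//b).
import Mathlib
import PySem

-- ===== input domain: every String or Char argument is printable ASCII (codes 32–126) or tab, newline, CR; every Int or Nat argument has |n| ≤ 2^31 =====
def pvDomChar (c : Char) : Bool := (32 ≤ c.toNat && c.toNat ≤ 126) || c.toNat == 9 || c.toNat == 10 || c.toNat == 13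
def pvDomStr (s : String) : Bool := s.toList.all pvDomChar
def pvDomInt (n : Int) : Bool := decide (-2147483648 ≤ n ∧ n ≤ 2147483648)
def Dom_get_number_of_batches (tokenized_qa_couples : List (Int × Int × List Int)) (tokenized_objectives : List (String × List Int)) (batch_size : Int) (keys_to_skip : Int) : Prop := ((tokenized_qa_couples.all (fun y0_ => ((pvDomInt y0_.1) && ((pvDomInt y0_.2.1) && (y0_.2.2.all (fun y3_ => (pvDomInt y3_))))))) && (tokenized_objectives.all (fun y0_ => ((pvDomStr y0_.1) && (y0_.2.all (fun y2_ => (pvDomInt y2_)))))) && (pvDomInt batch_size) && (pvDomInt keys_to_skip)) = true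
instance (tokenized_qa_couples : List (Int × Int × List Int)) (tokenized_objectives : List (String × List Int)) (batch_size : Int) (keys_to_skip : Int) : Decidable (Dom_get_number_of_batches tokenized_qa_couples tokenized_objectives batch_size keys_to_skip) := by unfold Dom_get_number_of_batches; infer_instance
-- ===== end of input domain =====

-- ===== PORT A =====
-- B is O(1) closed-form counting; A walks the whole key product. Port of A below is literal.
-- The Python dict arguments arrive as association lists; both ports rebuild the dicts
-- (PySem.Dict.ofList) keyed by the (Int × Int) tuple resp. the String, as Python does.
def get_number_of_batches (tokenized_qa_couples : List (Int × Int × List Int)) (tokenized_objectives : List (String × List Int)) (batch_size : Int) (keys_to_skip : Int) : Int :=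
  let qa := PySem.Dict.ofList (tokenized_qa_couples.map (fun p => ((p.1, p.2.1), p.2.2)))
  let obj := PySem.Dict.ofList tokenized_objectives
  -- key_qao_iterator_auxiliary with qakey_to_day = None: product of the two key sequences
  let pairs := qa.keys.flatMap (fun k => obj.keys.map (fun o => (k, o)))
  -- key_qao_iterator: 'next' keys_to_skip times (range of a negative int is empty; Pre_ excludes
  -- skipping past the end, where Python raises StopIteration)
  let it := pairs.drop (max keys_to_skip 0).toNat
  let total_size := it.foldl (fun acc _ => acc + 1) (0 : Int)
  PySem.Int.floordiv total_size batch_size + (if PySem.Int.mod total_size batch_size ≠ 0 then (1 : Int) else 0)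

-- ===== PORT B =====
def get_number_of_batches_alt (tokenized_qa_couples : List (Int × Int × List Int)) (tokenized_objectives : List (String × List Int)) (batch_size : Int) (keys_to_skip : Int) : Int :=
  let remaining : Int := ((PySem.Dict.ofList (tokenized_qa_couples.map (fun p => ((p.1, p.2.1), p.2.2)))).size : Int) * ((PySem.Dict.ofList tokenized_objectives).size : Int) - max keys_to_skip 0
  let result : Int := -(PySem.Int.floordiv (-remaining) batch_size)
  result

-- ===== PRECONDITION & SPEC =====
-- Pre_ excludes exactly the inputs on which A raises: batch_size = 0 (ZeroDivisionError) and
-- keys_to_skip greater than the number of qa-key/objective-key pairs (StopIteration while skipping).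
def Pre_get_number_of_batches (tokenized_qa_couples : List (Int × Int × List Int)) (tokenized_objectives : List (String × List Int)) (batch_size : Int) (keys_to_skip : Int) : Prop :=
  batch_size ≠ 0 ∧ keys_to_skip ≤ ((PySem.Dict.ofList (tokenized_qa_couples.map (fun p => ((p.1, p.2.1), p.2.2)))).size : Int) * ((PySem.Dict.ofList tokenized_objectives).size : Int)
instance (tokenized_qa_couples : List (Int × Int × List Int)) (tokenized_objectives : List (String × List Int)) (batch_size : Int) (keys_to_skip : Int) : Decidable (Pre_get_number_of_batches tokenized_qa_couples tokenized_objectives batch_size keys_to_skip) := by unfold Pre_get_number_of_batches; infer_instance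
def pvWitness_get_number_of_batches : (List (Int × Int × List Int)) × (List (String × List Int)) × Int × Int := ([(1, 2, [3]), (4, 5, [6])], [("a", [7]), ("b", [8])], 3, 1)

def Spec_get_number_of_batches (tokenized_qa_couples : List (Int × Int × List Int)) (tokenized_objectives : List (String × List Int)) (batch_size : Int) (keys_to_skip : Int) (out : Int) : Prop := out = get_number_of_batches_alt tokenized_qa_couples tokenized_objectives batch_size keys_to_skip
instance (tokenized_qa_couples : List (Int × Int × List Int)) (tokenized_objectives : List (String × List Int)) (batch_size : Int) (keys_to_skip : Int) (out : Int) : Decidable (Spec_get_number_of_batches tokenized_qa_couples tokenized_objectives batch_size keys_to_skip out) := by unfold Spec_get_number_of_batches; infer_instance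

-- ===== CLAIM (what is proved, stated in full; the proofs are below) =====
def Claim_equal_get_number_of_batches : Prop := ∀ (tokenized_qa_couples : List (Int × Int × List Int)) (tokenized_objectives : List (String × List Int)) (batch_size : Int) (keys_to_skip : Int), Dom_get_number_of_batches tokenized_qa_couples tokenized_objectives batch_size keys_to_skip → Pre_get_number_of_batches tokenized_qa_couples tokenized_objectives batch_size keys_to_skip → Spec_get_number_of_batches tokenized_qa_couples tokenized_objectives batch_size keys_to_skip (get_number_of_batches tokenized_qa_couples tokenized_objectives batch_size keys_to_skip)

-- ===== LEMMAS AND PROOFS =====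
lemma pv_foldl_count {α : Type} (l : List α) (acc : Int) : l.foldl (fun acc _ => acc + 1) acc = acc + l.length := by
  induction l generalizing acc with
  | nil => simp
  | cons x xs ih => simp [List.foldl, ih]; ring

lemma pv_ceil_pos (t b : Int) (hb : 0 < b) :
    PySem.Int.floordiv t b + (if PySem.Int.mod t b ≠ 0 then (1 : Int) else 0) = -PySem.Int.floordiv (-t) b := by
  have hfd : PySem.Int.floordiv t b = PySem.Int.floordiv t b := rfl
  obtain ⟨hlo, hhi⟩ := (PySem.Int.floordiv_eq_iff_of_pos hb).mp hfd
  have hmod := PySem.Int.floordiv_mul_add_mod t b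
  rw [eq_comm, PySem.Int.neg_floordiv_neg_eq_iff_of_pos hb]
  split_ifs with h
  · have hm0 : (0 : Int) ≤ PySem.Int.mod t b := by linarith
    have hmpos : (0 : Int) < PySem.Int.mod t b := lt_of_le_of_ne hm0 (Ne.symm h)
    constructor <;> nlinarith
  · rw [not_ne_iff] at h
    constructor <;> nlinarith
lemma pv_ceil (t b : Int) (hb : b ≠ 0) :
    PySem.Int.floordiv t b + (if PySem.Int.mod t b ≠ 0 then (1 : Int) else 0) = -PySem.Int.floordiv (-t) b := by
  rcases lt_or_gt_of_ne hb with hneg | hpos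
  · have hpos' : (0 : Int) < -b := by omega
    have h1 : PySem.Int.floordiv t b = PySem.Int.floordiv (-t) (-b) := (PySem.Int.floordiv_neg_neg t b).symm
    have h2 : PySem.Int.mod t b = -PySem.Int.mod (-t) (-b) := by
      have := PySem.Int.mod_neg_neg t b; omega
    have h3 : PySem.Int.floordiv (-t) b = PySem.Int.floordiv t (-b) := by
      have := PySem.Int.floordiv_neg_neg (-t) b; simpa using this.symm
    rw [h1, h2, h3]
    have := pv_ceil_pos (-t) (-b) hpos'
    simp only [neg_neg] at this
    simp only [neg_ne_zero]
    omega
  · exact pv_ceil_pos t b hpos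

lemma pv_pairs_length (qa : PySem.Dict (Int × Int) (List Int)) (obj : PySem.Dict String (List Int)) :
    (qa.keys.flatMap (fun k => obj.keys.map (fun o => (k, o)))).length = qa.size * obj.size := by
  simp only [List.length_flatMap, PySem.Dict.keys, PySem.Dict.size, List.map_map, Function.comp_def, List.length_map]
  rw [List.map_const', List.sum_replicate, smul_eq_mul]

-- ===== VERDICT (by name: the statement is the Claim_ definition above) =====
theorem get_number_of_batches_spec : Claim_equal_get_number_of_batches := by
  intro tqa tobj b k _ hpre
  obtain ⟨hb, hk⟩ := hpre
  unfold Spec_get_number_of_batches get_number_of_batches get_number_of_batches_alt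
  have hlen := pv_pairs_length (PySem.Dict.ofList (tqa.map (fun p => ((p.1, p.2.1), p.2.2)))) (PySem.Dict.ofList tobj)
  have htot : ((PySem.Dict.ofList (tqa.map (fun p => ((p.1, p.2.1), p.2.2)))).keys.flatMap
        (fun kk => (PySem.Dict.ofList tobj).keys.map (fun o => (kk, o)))
      |>.drop (max k 0).toNat |>.foldl (fun acc _ => acc + 1) (0 : Int))
      = (((PySem.Dict.ofList (tqa.map (fun p => ((p.1, p.2.1), p.2.2)))).size : Int) * ((PySem.Dict.ofList tobj).size : Int) - max k 0) := by
    rw [pv_foldl_count, List.length_drop, hlen]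
    omega
  simp only []
  rw [htot, pv_ceil _ b hb]
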